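-- pv_equiv track=rewrite | github.com/chraker/AOC_2017 | solutions/day4/part2.py | getWordCountDict
-- ===== SOURCE A (Python) =====
-- def getWordCountDict(word):
--     s = dict()
--     for letter in word:
--         if letter in s:
--             s[letter] += 1
--         else:
--             s[letter] = 1
--     return frozenset(s.items())
-- ===== SOURCE B (Python) =====
-- def getWordCountDict(word):
--     letters = list(word)
--     return frozenset((letter, letters.count(letter)) for letter in dict.fromkeys(word))
-- ===== Notes on version B (the rewrite author's own statement) =====
-- stated objective: simpler
-- what changed: Instead of incrementally maintaining a counter dict in one pass, B first deduplicates the letters in first-occurrence order (dict.fromkeys) and then counts each distinct letter with list.count, building the pairs in a single comprehension.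
import Mathlib
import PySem

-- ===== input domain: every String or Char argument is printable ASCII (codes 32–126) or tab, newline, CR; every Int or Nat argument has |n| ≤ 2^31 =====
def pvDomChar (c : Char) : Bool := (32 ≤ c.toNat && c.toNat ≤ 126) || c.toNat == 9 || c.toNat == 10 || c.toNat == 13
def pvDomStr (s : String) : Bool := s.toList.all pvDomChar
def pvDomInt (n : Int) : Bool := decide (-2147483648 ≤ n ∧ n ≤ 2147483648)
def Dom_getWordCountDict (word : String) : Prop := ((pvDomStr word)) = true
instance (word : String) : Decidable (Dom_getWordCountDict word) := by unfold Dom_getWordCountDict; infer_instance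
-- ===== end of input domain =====

-- B replaces A's incrementally-maintained counter dict by dedup-in-first-occurrence-order
-- followed by list.count per distinct letter (objective: simpler).

-- ===== PORT A =====
-- Python iterates a string as one-character strings; both ports share this view.
def pvLetters (word : String) : List String := word.toList.map (fun c => String.ofList [c])

def getWordCountDict (word : String) : List (String × Int) :=
  PySem.Set.ofList
    ((pvLetters word).foldl
      (fun d letter =>
        if d.contains letter then d.insert letter (d.getD letter 0 + 1)
        else d.insert letter 1)
      PySem.Dict.empty).items

-- ===== PORT B =====
def getWordCountDict_alt (word : String) : List (String × Int) :=
  PySem.Set.ofList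
    ((PySem.List.dedup (pvLetters word)).map
      (fun letter => (letter, (PySem.List.count (pvLetters word) letter : Int))))

-- ===== PRECONDITION & SPEC =====
def Spec_getWordCountDict (word : String) (out : List (String × Int)) : Prop := out = getWordCountDict_alt word
instance (word : String) (out : List (String × Int)) : Decidable (Spec_getWordCountDict word out) := by unfold Spec_getWordCountDict; infer_instance

-- ===== CLAIM (what is proved, stated in full; the proofs are below) =====
def Claim_equal_getWordCountDict : Prop := ∀ (word : String), Dom_getWordCountDict word → Spec_getWordCountDict word (getWordCountDict word)

-- ===== LEMMAS AND PROOFS =====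

-- A's branched loop body is extensionally the branchless counter step.
theorem pv_body_eq :
    (fun (d : PySem.Dict String Int) (letter : String) =>
      if d.contains letter then d.insert letter (d.getD letter 0 + 1)
      else d.insert letter 1) =
    (fun (d : PySem.Dict String Int) (x : String) => d.insert x (d.getD x 0 + 1)) := by
  funext d x
  cases h : d.contains x with
  | true => rfl
  | false => simp [PySem.Dict.getD_of_not_contains d 0 h]

theorem getWordCountDict_spec' (word : String) :
    getWordCountDict word = getWordCountDict_alt word := by
  unfold getWordCountDict getWordCountDict_alt
  rw [pv_body_eq, PySem.Dict.foldl_insert_getD_add_one_eq_counter, PySem.Dict.items_counter,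
    PySem.List.dedup_eq_ofList]
  simp only [PySem.List.count_eq]

-- ===== VERDICT (by name: the statement is the Claim_ definition above) =====
theorem getWordCountDict_spec : Claim_equal_getWordCountDict := by
  intro word _
  exact getWordCountDict_spec' word
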